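-- pv_equiv track=rewrite | github.com/Grimoid/Track-MDP | src/core/environment.py | check_valid_sensor
-- ===== SOURCE A (Python) =====
-- def check_valid_sensor(time_value, b_l, b_r, b_d, b_u):
--     grid_sz = (2*(time_value) + 3)
--     s_x_rel, s_y_rel = grid_sz//2, grid_sz//2
--     valid_ind = []
--     for i in range(grid_sz**2):
--         d_x, d_y = i%grid_sz - s_x_rel, i//grid_sz - s_y_rel
--         if (d_x >= b_l) and (d_x <= b_r) and (d_y >= b_d) and (d_y <= b_u):
--             valid_ind += [1]
--         else:
--             valid_ind += [0]
--
--     return valid_ind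
-- ===== SOURCE B (Python) =====
-- def check_valid_sensor(time_value, b_l, b_r, b_d, b_u):
--     # Per-axis decomposition: build the column mask once, then emit each row
--     # as either that mask or an all-zero row.
--     grid_sz = 2*time_value + 3
--     center = grid_sz // 2
--     col_mask = [1 if b_l <= x - center <= b_r else 0 for x in range(grid_sz)]
--     zero_row = [0] * grid_sz
--     out = []
--     for y in range(grid_sz):
--         d_y = y - center
--         out += col_mask if (b_d <= d_y <= b_u) else zero_row
--     return out
-- ===== Notes on version B (the rewrite author's own statement) =====
-- stated objective: simpler
-- what changed: Replaces the single flat loop over grid_sz**2 cells with per-cell %//-arithmetic by a per-axis decomposition: a column mask computed once, then one pass over rows appending either the mask or a zero row.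
-- intended difference: For time_value <= -2 the grid size 2*t+3 is negative, yet A still returns a list of (2*t+3)**2 entries computed from Python's negative-divisor %// arithmetic -- an artefact of its flat index loop; B returns the intended empty mask since a negative-sized grid has no cells. — e.g. on check_valid_sensor(-2, 0, 0, 0, 0): A returns [0], B returns []
import Mathlib
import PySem

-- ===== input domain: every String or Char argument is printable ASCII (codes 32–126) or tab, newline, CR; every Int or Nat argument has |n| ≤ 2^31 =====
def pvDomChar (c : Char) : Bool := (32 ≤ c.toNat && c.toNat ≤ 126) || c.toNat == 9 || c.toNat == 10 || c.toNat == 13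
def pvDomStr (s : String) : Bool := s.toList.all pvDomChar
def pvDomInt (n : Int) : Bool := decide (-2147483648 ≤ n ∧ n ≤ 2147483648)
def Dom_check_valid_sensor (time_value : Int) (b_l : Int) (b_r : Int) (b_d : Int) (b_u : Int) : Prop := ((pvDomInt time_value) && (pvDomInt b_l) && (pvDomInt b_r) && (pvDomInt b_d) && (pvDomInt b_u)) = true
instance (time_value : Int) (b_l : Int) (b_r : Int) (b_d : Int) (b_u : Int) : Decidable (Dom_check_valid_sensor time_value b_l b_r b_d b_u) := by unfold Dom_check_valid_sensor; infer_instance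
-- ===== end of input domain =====

-- B replaces the flat loop with per-cell divmod by a per-axis decomposition (column
-- mask built once, then one pass over rows); for negative grid sizes (time_value ≤ -2)
-- B returns the intended empty mask instead of A's negative-divmod artefact list.

-- ===== PORT A =====
def check_valid_sensor (time_value : Int) (b_l : Int) (b_r : Int) (b_d : Int) (b_u : Int) : List Int :=
  let grid_sz := 2 * time_value + 3
  let s_x_rel := PySem.Int.floordiv grid_sz 2
  let s_y_rel := PySem.Int.floordiv grid_sz 2
  (PySem.List.pyRange 0 (grid_sz ^ 2) 1).foldl (fun valid_ind i =>
    let d_x := PySem.Int.mod i grid_sz - s_x_rel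
    let d_y := PySem.Int.floordiv i grid_sz - s_y_rel
    if b_l ≤ d_x ∧ d_x ≤ b_r ∧ b_d ≤ d_y ∧ d_y ≤ b_u then valid_ind ++ [1]
    else valid_ind ++ [0]) []

-- ===== PORT B =====
def check_valid_sensor_alt (time_value : Int) (b_l : Int) (b_r : Int) (b_d : Int) (b_u : Int) : List Int :=
  let grid_sz := 2 * time_value + 3
  let center := PySem.Int.floordiv grid_sz 2
  let col_mask := (PySem.List.pyRange 0 grid_sz 1).map
    (fun x => if b_l ≤ x - center ∧ x - center ≤ b_r then (1 : Int) else 0)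
  let zero_row := PySem.List.pyRepeat [(0 : Int)] grid_sz
  (PySem.List.pyRange 0 grid_sz 1).foldl (fun out y =>
    let d_y := y - center
    out ++ (if b_d ≤ d_y ∧ d_y ≤ b_u then col_mask else zero_row)) []

-- ===== PRECONDITION & SPEC =====
-- For time_value ≤ -2 the grid size 2*t+3 is negative, yet A still returns a list of
-- (2*t+3)^2 entries computed from Python's negative-divisor %// arithmetic — an artefact
-- of its flat index loop; B returns the intended empty mask (no cells in a negative grid).
def D_check_valid_sensor (time_value : Int) (b_l : Int) (b_r : Int) (b_d : Int) (b_u : Int) : Prop :=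
  time_value ≤ -2
instance (time_value : Int) (b_l : Int) (b_r : Int) (b_d : Int) (b_u : Int) : Decidable (D_check_valid_sensor time_value b_l b_r b_d b_u) := by unfold D_check_valid_sensor; infer_instance
def Spec_check_valid_sensor (time_value : Int) (b_l : Int) (b_r : Int) (b_d : Int) (b_u : Int) (out : List Int) : Prop := ¬ D_check_valid_sensor time_value b_l b_r b_d b_u → out = check_valid_sensor_alt time_value b_l b_r b_d b_u
instance (time_value : Int) (b_l : Int) (b_r : Int) (b_d : Int) (b_u : Int) (out : List Int) : Decidable (Spec_check_valid_sensor time_value b_l b_r b_d b_u out) := by unfold Spec_check_valid_sensor; infer_instance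

def pvDiffWitness_check_valid_sensor : Int × Int × Int × Int × Int := (-2, 0, 0, 0, 0)
def pvDiffWitnessOut_check_valid_sensor : (List Int) × (List Int) := ([0], [])

-- ===== CLAIM (what is proved, stated in full; the proofs are below) =====
def Claim_unchanged_check_valid_sensor : Prop := ∀ (time_value : Int) (b_l : Int) (b_r : Int) (b_d : Int) (b_u : Int), Dom_check_valid_sensor time_value b_l b_r b_d b_u → Spec_check_valid_sensor time_value b_l b_r b_d b_u (check_valid_sensor time_value b_l b_r b_d b_u)
def Claim_changed_check_valid_sensor : Prop := Dom_check_valid_sensor (pvDiffWitness_check_valid_sensor.1) (pvDiffWitness_check_valid_sensor.2.1) (pvDiffWitness_check_valid_sensor.2.2.1) (pvDiffWitness_check_valid_sensor.2.2.2.1) (pvDiffWitness_check_valid_sensor.2.2.2.2) ∧ D_check_valid_sensor (pvDiffWitness_check_valid_sensor.1) (pvDiffWitness_check_valid_sensor.2.1) (pvDiffWitness_check_valid_sensor.2.2.1) (pvDiffWitness_check_valid_sensor.2.2.2.1) (pvDiffWitness_check_valid_sensor.2.2.2.2) ∧ check_valid_sensor (pvDiffWitness_check_valid_sensor.1) (pvDiffWitness_check_valid_sensor.2.1)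 (pvDiffWitness_check_valid_sensor.2.2.1) (pvDiffWitness_check_valid_sensor.2.2.2.1) (pvDiffWitness_check_valid_sensor.2.2.2.2) = pvDiffWitnessOut_check_valid_sensor.1 ∧ check_valid_sensor_alt (pvDiffWitness_check_valid_sensor.1) (pvDiffWitness_check_valid_sensor.2.1) (pvDiffWitness_check_valid_sensor.2.2.1) (pvDiffWitness_check_valid_sensor.2.2.2.1) (pvDiffWitness_check_valid_sensor.2.2.2.2) = pvDiffWitnessOut_check_valid_sensor.2 ∧ pvDiffWitnessOut_check_valid_sensor.1 ≠ pvDiffWitnessOut_check_valid_sensor.2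
def Claim_exact_check_valid_sensor : Prop := ∀ (time_value : Int) (b_l : Int) (b_r : Int) (b_d : Int) (b_u : Int), Dom_check_valid_sensor time_value b_l b_r b_d b_u → D_check_valid_sensor time_value b_l b_r b_d b_u → check_valid_sensor time_value b_l b_r b_d b_u ≠ check_valid_sensor_alt time_value b_l b_r b_d b_u

-- ===== LEMMAS AND PROOFS =====

-- map over a block range [0, m*g) with divmod = concatenation of m rows
theorem pv_block_split (g : Int) (hg : 0 < g) (f : Int → Int) :
    ∀ m : Nat,
      (PySem.List.pyRange 0 ((m : Int) * g) 1).map f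
        = (PySem.List.pyRange 0 (m : Int) 1).flatMap
            (fun y => (PySem.List.pyRange 0 g 1).map (fun x => f (y * g + x))) := by
  intro m
  induction m with
  | zero => simp [PySem.List.pyRange_one_eq_nil]
  | succ m ih =>
    have h1 : (0 : Int) ≤ (m : Int) * g := by positivity
    have h2 : (m : Int) * g ≤ ((m + 1 : Nat) : Int) * g := by push_cast; nlinarith
    rw [PySem.List.pyRange_one_append 0 ((m : Int) * g) (((m + 1 : Nat) : Int) * g) h1 h2,
        List.map_append, ih]
    have hy : PySem.List.pyRange 0 ((m + 1 : Nat) : Int) 1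
        = PySem.List.pyRange 0 (m : Int) 1 ++ [(m : Int)] := by
      push_cast
      exact PySem.List.pyRange_one_succ_right (a := 0) (b := (m : Int)) (by positivity)
    rw [hy, List.flatMap_append]
    congr 1
    simp only [List.flatMap_cons, List.flatMap_nil, List.append_nil]
    rw [PySem.List.pyRange_one 0 g, PySem.List.pyRange_one ((m : Int) * g) (((m + 1 : Nat) : Int) * g)]
    have h3 : (((m + 1 : Nat) : Int) * g - (m : Int) * g) = g - 0 := by push_cast; ring
    rw [h3]
    simp only [List.map_map]
    apply List.map_congr_left
    intro k _
    simp only [Function.comp]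
    ring_nf

theorem pv_divmod_cell (g y x : Int) (hg : 0 < g) (hx0 : 0 ≤ x) (hxg : x < g) :
    PySem.Int.mod (y * g + x) g = x ∧ PySem.Int.floordiv (y * g + x) g = y := by
  rw [PySem.Int.mod_eq_emod_of_pos hg, PySem.Int.floordiv_eq_ediv_of_pos hg,
      show y * g + x = x + g * y by ring]
  constructor
  · rw [Int.add_mul_emod_self_left, Int.emod_eq_of_lt hx0 hxg]
  · rw [Int.add_mul_ediv_left _ _ (by omega : g ≠ 0), Int.ediv_eq_zero_of_lt hx0 hxg]
    omega

-- A's loop body written as 'append one element'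
theorem pv_A_fun (g c b_l b_r b_d b_u : Int) :
    (fun (valid_ind : List Int) (i : Int) =>
      if b_l ≤ PySem.Int.mod i g - c ∧ PySem.Int.mod i g - c ≤ b_r ∧
         b_d ≤ PySem.Int.floordiv i g - c ∧ PySem.Int.floordiv i g - c ≤ b_u
      then valid_ind ++ [1] else valid_ind ++ [0])
    = (fun valid_ind i => valid_ind ++
        [if b_l ≤ PySem.Int.mod i g - c ∧ PySem.Int.mod i g - c ≤ b_r ∧
            b_d ≤ PySem.Int.floordiv i g - c ∧ PySem.Int.floordiv i g - c ≤ b_u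
         then (1 : Int) else 0]) := by
  funext a i
  split <;> rfl

theorem pv_A_eq_B (time_value b_l b_r b_d b_u : Int) (ht : -1 ≤ time_value) :
    check_valid_sensor time_value b_l b_r b_d b_u
      = check_valid_sensor_alt time_value b_l b_r b_d b_u := by
  unfold check_valid_sensor check_valid_sensor_alt
  simp only []
  set g := 2 * time_value + 3 with hgdef
  have hg : 0 < g := by omega
  set c := PySem.Int.floordiv g 2 with hc
  set col_mask := (PySem.List.pyRange 0 g 1).map
    (fun x => if b_l ≤ x - c ∧ x - c ≤ b_r then (1 : Int) else 0) with hcol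
  set zero_row := PySem.List.pyRepeat [(0 : Int)] g with hzr
  -- A side: the foldl is a map
  rw [pv_A_fun g c b_l b_r b_d b_u, PySem.List.foldl_append_singleton_eq_map,
      List.nil_append]
  set f : Int → Int := fun i =>
    if b_l ≤ PySem.Int.mod i g - c ∧ PySem.Int.mod i g - c ≤ b_r ∧
       b_d ≤ PySem.Int.floordiv i g - c ∧ PySem.Int.floordiv i g - c ≤ b_u
    then (1 : Int) else 0 with hf
  -- B side: the foldl is a flatMap
  rw [PySem.List.foldl_append_eq_flatMap, List.nil_append]
  -- rewrite A's range as g.toNat rows of g cells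
  have hm : g ^ 2 = (g.toNat : Int) * g := by
    rw [Int.toNat_of_nonneg (by omega)]; ring
  rw [hm, pv_block_split g hg f g.toNat, Int.toNat_of_nonneg (le_of_lt hg)]
  -- rows coincide
  rw [List.flatMap_def, List.flatMap_def]
  congr 1
  apply List.map_congr_left
  intro y hy
  have hy' := (PySem.List.mem_pyRange_one).1 hy
  have hrow : ∀ x, 0 ≤ x → x < g → f (y * g + x)
      = (if b_d ≤ y - c ∧ y - c ≤ b_u then
           (if b_l ≤ x - c ∧ x - c ≤ b_r then (1 : Int) else 0) else 0) := by
    intro x hx0 hxg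
    obtain ⟨hmod, hdiv⟩ := pv_divmod_cell g y x hg hx0 hxg
    simp only [hf, hmod, hdiv]
    split_ifs <;> first | rfl | tauto
  by_cases hrc : b_d ≤ y - c ∧ y - c ≤ b_u
  · simp only [hrc, hcol]
    apply List.map_congr_left
    intro x hx
    have hx' := (PySem.List.mem_pyRange_one).1 hx
    rw [hrow x hx'.1 hx'.2, if_pos hrc]
  · simp only [hrc, if_false, hzr, PySem.List.pyRepeat_singleton]
    have hlen : ∀ x ∈ PySem.List.pyRange 0 g 1, f (y * g + x) = 0 := by
      intro x hx
      have hx' := (PySem.List.mem_pyRange_one).1 hx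
      rw [hrow x hx'.1 hx'.2, if_neg hrc]
    calc (PySem.List.pyRange 0 g 1).map (fun x => f (y * g + x))
        = (PySem.List.pyRange 0 g 1).map (fun _ => (0 : Int)) :=
          List.map_congr_left hlen
      _ = List.replicate g.toNat (0 : Int) := by
          rw [List.map_const', PySem.List.length_pyRange_one]
          norm_num

-- ===== VERDICT (by name: the statement is the Claim_ definition above) =====
theorem check_valid_sensor_spec : Claim_unchanged_check_valid_sensor := by
  intro t b_l b_r b_d b_u _ hnd
  have ht : -1 ≤ t := by unfold D_check_valid_sensor at hnd; omega
  exact pv_A_eq_B t b_l b_r b_d b_u ht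

theorem check_valid_sensor_changed : Claim_changed_check_valid_sensor := by
  unfold Claim_changed_check_valid_sensor; decide

theorem check_valid_sensor_tight : Claim_exact_check_valid_sensor := by
  intro t b_l b_r b_d b_u _ hd
  unfold D_check_valid_sensor at hd
  unfold check_valid_sensor check_valid_sensor_alt
  simp only []
  set g := 2 * t + 3 with hgdef
  have hgneg : g < 0 := by omega
  set c := PySem.Int.floordiv g 2 with hc
  -- B is the empty list
  have hB : PySem.List.pyRange 0 g 1 = [] := PySem.List.pyRange_one_eq_nil (by omega)
  simp only [hB, List.foldl_nil]
  -- A has (g^2).toNat ≥ 1 elements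
  rw [pv_A_fun g c b_l b_r b_d b_u, PySem.List.foldl_append_singleton_eq_map, List.nil_append]
  intro hcontra
  have hlen := congrArg List.length hcontra
  rw [List.length_map, PySem.List.length_pyRange_one] at hlen
  simp only [List.length_nil] at hlen
  have hg2 : 1 ≤ g ^ 2 - 0 := by nlinarith
  omega
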